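-- pv_equiv track=rewrite | github.com/sueszli/vector-database-benchmark | dataset/python-mutated/lines.py | enumerate_reversed
-- ===== SOURCE A (Python) =====
-- from typing import Callable, Dict, Iterator, List, Optional, Sequence, Tuple, TypeVar, Union, cast
--
-- T = TypeVar('T')
--
-- Index = int
--
-- def enumerate_reversed(sequence: Sequence[T]) -> Iterator[Tuple[Index, T]]:
--     if False:
--         while True:
--             i = 10
--     'Like `reversed(enumerate(sequence))` if that were possible.'
--     index = len(sequence) - 1
--     for element in reversed(sequence):
--         yield (index, element)
--         index -= 1
-- ===== SOURCE B (Python) =====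
-- from typing import Iterator, Sequence, Tuple, TypeVar
--
-- T = TypeVar('T')
--
-- Index = int
--
-- def enumerate_reversed(sequence: Sequence[T]) -> Iterator[Tuple[Index, T]]:
--     'Like `reversed(enumerate(sequence))` if that were possible.'
--     pairs = list(enumerate(sequence))
--     pairs.reverse()
--     yield from pairs
-- ===== Notes on version B (the rewrite author's own statement) =====
-- stated objective: simpler
-- what changed: B is two staged passes: it first materialises the forward enumeration list(enumerate(sequence)) and then reverses that list and yields from it, instead of A's single backward pass over reversed(sequence) that threads a separately decremented index counter; the dead 'if False' block is dropped.
import Mathlib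
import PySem

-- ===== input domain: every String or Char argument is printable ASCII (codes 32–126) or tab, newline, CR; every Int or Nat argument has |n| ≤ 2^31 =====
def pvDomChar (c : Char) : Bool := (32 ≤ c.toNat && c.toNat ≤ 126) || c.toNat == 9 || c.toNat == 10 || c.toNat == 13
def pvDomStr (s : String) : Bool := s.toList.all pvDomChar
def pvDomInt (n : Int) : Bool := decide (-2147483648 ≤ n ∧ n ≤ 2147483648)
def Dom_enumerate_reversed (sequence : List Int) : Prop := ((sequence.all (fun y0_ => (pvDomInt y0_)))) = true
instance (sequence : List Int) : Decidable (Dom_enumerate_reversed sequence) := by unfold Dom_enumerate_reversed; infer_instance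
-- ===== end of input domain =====

-- B replaces A's backward pass with a decrementing counter by two staged passes — build the forward enumeration, then reverse it (simpler decomposition; generator return value only; dead 'if False' block dropped).


-- ===== PORT A =====
-- Transliteration of A: fold over reversed(sequence), threading (yielded list, decrementing index).
def enumerate_reversed (sequence : List Int) : List (Int × Int) :=
  (sequence.reverse.foldl
    (fun (st : List (Int × Int) × Int) element => (st.1 ++ [(st.2, element)], st.2 - 1))
    ([], (sequence.length : Int) - 1)).1

-- ===== PORT B =====
-- Transliteration of B: pairs = list(enumerate(sequence)); pairs.reverse(); yield from pairs.
def enumerate_reversed_alt (sequence : List Int) : List (Int × Int) :=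
  (PySem.List.enumerate sequence 0).reverse

-- ===== PRECONDITION & SPEC =====
def Spec_enumerate_reversed (sequence : List Int) (out : List (Int × Int)) : Prop := out = enumerate_reversed_alt sequence
instance (sequence : List Int) (out : List (Int × Int)) : Decidable (Spec_enumerate_reversed sequence out) := by unfold Spec_enumerate_reversed; infer_instance

-- ===== CLAIM (what is proved, stated in full; the proofs are below) =====
def Claim_equal_enumerate_reversed : Prop := ∀ (sequence : List Int), Dom_enumerate_reversed sequence → Spec_enumerate_reversed sequence (enumerate_reversed sequence)

-- ===== LEMMAS AND PROOFS =====

-- A's fold with a nonempty accumulator only prepends it.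
theorem foldA_acc (xs : List Int) (acc : List (Int × Int)) (i : Int) :
    (xs.foldl (fun (st : List (Int × Int) × Int) e => (st.1 ++ [(st.2, e)], st.2 - 1)) (acc, i)).1
    = acc ++ (xs.foldl (fun (st : List (Int × Int) × Int) e => (st.1 ++ [(st.2, e)], st.2 - 1)) ([], i)).1 := by
  induction xs generalizing acc i with
  | nil => simp
  | cons x xs ih =>
    simp only [List.foldl_cons, List.nil_append]
    rw [ih, ih [(i, x)]]
    simp

theorem A_snoc (l : List Int) (a : Int) :
    enumerate_reversed (l ++ [a]) = ((l.length : Int), a) :: enumerate_reversed l := by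
  simp only [enumerate_reversed, List.reverse_append, List.reverse_cons, List.reverse_nil,
    List.nil_append, List.cons_append, List.foldl_cons, List.length_append, List.length_cons,
    List.length_nil]
  rw [foldA_acc]
  have h1 : ((l.length + (0 + 1) : Nat) : Int) - 1 = (l.length : Int) := by push_cast; ring
  rw [h1]
  simp

theorem B_snoc (l : List Int) (a : Int) :
    enumerate_reversed_alt (l ++ [a]) = ((l.length : Int), a) :: enumerate_reversed_alt l := by
  simp [enumerate_reversed_alt, PySem.List.enumerate_append, PySem.List.enumerate_cons]

theorem AB_eq (l : List Int) : enumerate_reversed l = enumerate_reversed_alt l := by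
  induction l using List.reverseRecOn with
  | nil => decide
  | append_singleton l a ih => rw [A_snoc, B_snoc, ih]

-- ===== VERDICT (by name: the statement is the Claim_ definition above) =====
theorem enumerate_reversed_spec : Claim_equal_enumerate_reversed := by
  intro sequence _
  exact AB_eq sequence
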